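-- pv_equiv track=rewrite | github.com/FelixLee888/ChiefFaFaBot | scripts/chief_fafa_recipe_pipeline.py | select_caption_track_url
-- ===== SOURCE A (Python) =====
-- from typing import Any, Dict, Iterable, List, Optional, Tuple
--
-- def select_caption_track_url(tracks: Any, preferred_lang: str = "") -> str:
--     if not isinstance(tracks, dict):
--         return ""
--     preferred_tokens = [preferred_lang.casefold()] if preferred_lang else []
--     preferred_tokens.extend(["zh-hant", "zh-hans", "zh", "yue", "ja", "ko", "en"])
--     scored: List[Tuple[int, str]] = []
--     for lang, entries in tracks.items():
--         if not isinstance(entries, list):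
--             continue
--         lang_low = str(lang).casefold()
--         lang_score = 0
--         for idx, token in enumerate(preferred_tokens):
--             if token and (lang_low == token or lang_low.startswith(token)):
--                 lang_score = max(lang_score, 100 - idx)
--                 break
--         for ent in entries:
--             if not isinstance(ent, dict):
--                 continue
--             u = str(ent.get("url", "")).strip()
--             if not u:
--                 continue
--             ext = str(ent.get("ext", "")).lower()
--             ext_score = 0
--             if ext == "vtt":
--                 ext_score = 30
--             elif ext in {"srv3", "srv2", "ttml", "srt"}:
--                 ext_score = 20
--             scored.append((lang_score + ext_score, u))
--     if not scored:
--         return ""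
--     scored.sort(key=lambda x: x[0], reverse=True)
--     return scored[0][1]
-- ===== SOURCE B (Python) =====
-- def select_caption_track_url(tracks, preferred_lang=""):
--     # Linear scan with a (best_score, best_url) accumulator instead of A's
--     # build-a-list-then-stable-sort; ext scores come from a lookup table and the
--     # language rank from the index of the first matching token (startswith
--     # subsumes A's equality test). Strict '>' keeps A's first-wins tie-break.
--     if not isinstance(tracks, dict):
--         return ""
--     tokens = ([preferred_lang.casefold()] if preferred_lang else []) + [
--         "zh-hant", "zh-hans", "zh", "yue", "ja", "ko", "en"
--     ]
--     ext_table = {"vtt": 30, "srv3": 20, "srv2": 20, "ttml": 20, "srt": 20}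
--     best_score, best_url = -1, ""
--     for lang, entries in tracks.items():
--         if not isinstance(entries, list):
--             continue
--         lang_low = str(lang).casefold()
--         idx = next((i for i, t in enumerate(tokens) if t and lang_low.startswith(t)), None)
--         lang_score = 0 if idx is None else 100 - idx
--         for ent in entries:
--             if not isinstance(ent, dict):
--                 continue
--             score = lang_score + ext_table.get(str(ent.get("ext", "")).lower(), 0)
--             u = str(ent.get("url", "")).strip()
--             if u and score > best_score:
--                 best_score, best_url = score, u
--     return best_url
-- ===== Notes on version B (the rewrite author's own statement) =====
-- stated objective: alternative
-- what changed: B replaces A's build-a-(score,url)-list plus full stable reverse sort by a single linear scan carrying a (best_score, best_url) accumulator, scoring extensions via a lookup table and the language via the first-matching-token index; strict '>' reproduces the stable sort's first-wins tie-break.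
import Mathlib
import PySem

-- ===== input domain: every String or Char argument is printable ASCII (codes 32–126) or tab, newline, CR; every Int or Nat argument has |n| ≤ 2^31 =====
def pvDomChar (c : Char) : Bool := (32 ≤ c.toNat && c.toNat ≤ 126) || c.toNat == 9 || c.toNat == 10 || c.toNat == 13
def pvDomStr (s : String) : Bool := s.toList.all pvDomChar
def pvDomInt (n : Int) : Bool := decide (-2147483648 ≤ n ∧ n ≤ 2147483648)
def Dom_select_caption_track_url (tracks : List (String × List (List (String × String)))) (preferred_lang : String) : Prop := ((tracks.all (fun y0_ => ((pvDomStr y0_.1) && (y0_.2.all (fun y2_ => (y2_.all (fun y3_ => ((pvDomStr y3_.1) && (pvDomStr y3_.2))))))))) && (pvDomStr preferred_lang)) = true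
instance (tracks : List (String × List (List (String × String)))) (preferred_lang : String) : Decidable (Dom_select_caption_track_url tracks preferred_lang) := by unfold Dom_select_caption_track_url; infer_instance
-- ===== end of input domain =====

-- B replaces A's build-a-(score,url)-list + stable reverse sort by a single linear scan
-- carrying a (best_score, best_url) accumulator (sentinel -1), with the extension score
-- from a lookup table and the language score from the first matching token's index;
-- strict '>' reproduces the stable sort's first-wins tie-break. casefold is ported as
-- lower (exact on the ASCII domain).

-- ===== PORT A =====
-- A's token loop with break: first nonempty token that equals / prefixes lang_low
def pvLangScoreA : List (Int × String) → String → Int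
  | [], _ => 0
  | (idx, token) :: rest, lang_low =>
      if token ≠ "" ∧ (lang_low = token ∨ PySem.Str.startswith lang_low token) then
        max 0 (100 - idx)
      else pvLangScoreA rest lang_low

-- body of A's inner 'for ent in entries' loop (accumulator: the scored list)
def pvInnerStepA (lang_score : Int) (scored : List (Int × String)) (ent : List (String × String)) : List (Int × String) :=
  let d := PySem.Dict.ofList ent
  let u := PySem.Str.strip (d.getD "url" "")
  if u = "" then scored
  else
    let ext := PySem.Str.lower (d.getD "ext" "")
    let ext_score : Int :=
      if ext = "vtt" then 30
      else if ext = "srv3" ∨ ext = "srv2" ∨ ext = "ttml" ∨ ext = "srt" then 20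
      else 0
    scored ++ [(lang_score + ext_score, u)]

-- body of A's outer 'for lang, entries in tracks.items()' loop
def pvOuterStepA (preferred_tokens : List String) (scored : List (Int × String))
    (litem : String × List (List (String × String))) : List (Int × String) :=
  let lang_low := PySem.Str.lower litem.1
  let lang_score := pvLangScoreA (PySem.List.enumerate preferred_tokens) lang_low
  litem.2.foldl (pvInnerStepA lang_score) scored

def select_caption_track_url (tracks : List (String × List (List (String × String)))) (preferred_lang : String) : String :=
  let preferred_tokens :=
    (if preferred_lang ≠ "" then [PySem.Str.lower preferred_lang] else []) ++
    ["zh-hant", "zh-hans", "zh", "yue", "ja", "ko", "en"]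
  let scored := (PySem.Dict.ofList tracks).items.foldl (pvOuterStepA preferred_tokens) []
  if scored.isEmpty then ""
  else
    match PySem.List.sorted scored (fun x => x.1) true with
    | [] => ""
    | (_, u) :: _ => u

-- ===== PORT B =====
-- B's 'next((i for i, t in enumerate(tokens) if t and lang_low.startswith(t)), None)'
def pvFirstHit (i : Int) (s : String) : List String → Option Int
  | [] => none
  | t :: ts => if t ≠ "" ∧ PySem.Str.startswith s t then some i else pvFirstHit (i + 1) s ts

-- B's ext_table
def pvExtTable : PySem.Dict String Int :=
  PySem.Dict.ofList [("vtt", 30), ("srv3", 20), ("srv2", 20), ("ttml", 20), ("srt", 20)]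

-- body of B's inner loop: update the (best_score, best_url) accumulator with one entry
def pvBestEnt (lang_score : Int) (best : Int × String) (ent : List (String × String)) : Int × String :=
  let d := PySem.Dict.ofList ent
  let score := lang_score + pvExtTable.getD (PySem.Str.lower (d.getD "ext" "")) 0
  let u := PySem.Str.strip (d.getD "url" "")
  if u ≠ "" ∧ best.1 < score then (score, u) else best

def pvBestEnts (lang_score : Int) : List (List (String × String)) → (Int × String) → Int × String
  | [], best => best
  | e :: es, best => pvBestEnts lang_score es (pvBestEnt lang_score best e)

-- B's outer loop as structural recursion over the track items
def pvScan (tokens : List String) : List (String × List (List (String × String))) → (Int × String) → Int × String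
  | [], best => best
  | (lang, entries) :: rest, best =>
      let lang_low := PySem.Str.lower lang
      let lang_score : Int :=
        match pvFirstHit 0 lang_low tokens with
        | none => 0
        | some i => 100 - i
      pvScan tokens rest (pvBestEnts lang_score entries best)

def select_caption_track_url_alt (tracks : List (String × List (List (String × String)))) (preferred_lang : String) : String :=
  let tokens :=
    (if preferred_lang ≠ "" then [PySem.Str.lower preferred_lang] else []) ++
    ["zh-hant", "zh-hans", "zh", "yue", "ja", "ko", "en"]
  (pvScan tokens (PySem.Dict.ofList tracks).items (-1, "")).2

-- ===== PRECONDITION & SPEC =====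
def Spec_select_caption_track_url (tracks : List (String × List (List (String × String)))) (preferred_lang : String) (out : String) : Prop := out = select_caption_track_url_alt tracks preferred_lang
instance (tracks : List (String × List (List (String × String)))) (preferred_lang : String) (out : String) : Decidable (Spec_select_caption_track_url tracks preferred_lang out) := by unfold Spec_select_caption_track_url; infer_instance

-- ===== CLAIM (what is proved, stated in full; the proofs are below) =====
def Claim_equal_select_caption_track_url : Prop := ∀ (tracks : List (String × List (List (String × String)))) (preferred_lang : String), Dom_select_caption_track_url tracks preferred_lang → Spec_select_caption_track_url tracks preferred_lang (select_caption_track_url tracks preferred_lang)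

-- ===== LEMMAS AND PROOFS =====

-- B's language score as a function (for stating the candidate list)
def pvLangScoreC (tokens : List String) (s : String) : Int :=
  match pvFirstHit 0 s tokens with
  | none => 0
  | some i => 100 - i

-- the running-max step over Option (head of a stable descending sort)
def pvMaxStep (o : Option (Int × String)) (p : Int × String) : Option (Int × String) :=
  match o with
  | none => some p
  | some m => if m.1 < p.1 then some p else some m

-- the running-max step over the sentinel pair (B's accumulator)
def pvStepSent (b p : Int × String) : Int × String :=
  if b.1 < p.1 then p else b

-- the per-entry contribution of one entry, as a list (empty or a singleton)
def pvEntItems (ls : Int) (ent : List (String × String)) : List (Int × String) :=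
  let d := PySem.Dict.ofList ent
  let u := PySem.Str.strip (d.getD "url" "")
  if u = "" then []
  else
    let ext := PySem.Str.lower (d.getD "ext" "")
    let ext_score : Int :=
      if ext = "vtt" then 30
      else if ext = "srv3" ∨ ext = "srv2" ∨ ext = "ttml" ∨ ext = "srt" then 20
      else 0
    [(ls + ext_score, u)]

def pvTrackItems (tokens : List String) (litem : String × List (List (String × String))) : List (Int × String) :=
  litem.2.flatMap (pvEntItems (pvLangScoreC tokens (PySem.Str.lower litem.1)))

lemma pvFirstHit_bound (ts : List String) (s : String) (i j : Int)
    (h : pvFirstHit i s ts = some j) : i ≤ j ∧ j < i + ts.length := by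
  induction ts generalizing i with
  | nil => simp [pvFirstHit] at h
  | cons t rest ih =>
    simp only [pvFirstHit] at h
    split_ifs at h with hc
    · cases h; simp
    · have := ih (i + 1) h
      simp only [List.length_cons]
      push_cast
      omega

lemma pvLangScore_eq (ts : List String) (s : String) (i : Int)
    (hi : 0 ≤ i) (hb : i + ts.length ≤ 100) :
    pvLangScoreA (PySem.List.enumerate ts i) s =
      (match pvFirstHit i s ts with
       | none => 0
       | some j => 100 - j) := by
  induction ts generalizing i with
  | nil => simp [PySem.List.enumerate_nil, pvLangScoreA, pvFirstHit]
  | cons t rest ih =>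
    rw [PySem.List.enumerate_cons]
    simp only [pvLangScoreA, pvFirstHit, List.length_cons] at hb ⊢
    have hmax : max 0 (100 - i) = 100 - i := by push_cast at hb; omega
    have hrest := ih (i + 1) (by omega) (by push_cast at hb ⊢; omega)
    by_cases hne : t = ""
    · simp [hne, hrest]
    · by_cases hsw : PySem.Chars.startswith s.toList t.toList = true
      · simp [hne, hsw, hmax]
      · have hnq : ¬ s = t := by
          intro heq; subst heq
          exact hsw ((PySem.Chars.startswith_iff s.toList s.toList).mpr (List.prefix_refl _))
        simp [hne, hsw, hnq, hrest]

lemma pvLangScoreC_nonneg (ts : List String) (s : String) (hb : (ts.length : Int) ≤ 100) :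
    0 ≤ pvLangScoreC ts s := by
  cases h : pvFirstHit 0 s ts with
  | none => simp [pvLangScoreC, h]
  | some j =>
    have := pvFirstHit_bound ts s 0 j h
    simp only [pvLangScoreC, h]
    omega

lemma pvExtTable_getD (e : String) :
    pvExtTable.getD e 0 =
      (if e = "vtt" then 30
       else if e = "srv3" ∨ e = "srv2" ∨ e = "ttml" ∨ e = "srt" then 20
       else (0 : Int)) := by
  simp only [pvExtTable, PySem.Dict.ofList, PySem.Dict.update, List.foldl_cons, List.foldl_nil,
    PySem.Dict.getD_insert, PySem.Dict.getD_empty]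
  split_ifs <;> simp_all

lemma pvBestEnt_eq (ls : Int) (b : Int × String) (e : List (String × String)) :
    pvBestEnt ls b e = (pvEntItems ls e).foldl pvStepSent b := by
  simp only [pvBestEnt, pvEntItems, pvExtTable_getD]
  split_ifs with h1 h2 h2 <;> simp_all [pvStepSent]

lemma pvBestEnts_eq (ls : Int) (es : List (List (String × String))) (b : Int × String) :
    pvBestEnts ls es b = (es.flatMap (pvEntItems ls)).foldl pvStepSent b := by
  induction es generalizing b with
  | nil => rfl
  | cons e es ih =>
    simp only [pvBestEnts, List.flatMap_cons, List.foldl_append]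
    rw [ih, pvBestEnt_eq]

lemma pvScan_eq (tokens : List String) (items : List (String × List (List (String × String))))
    (b : Int × String) :
    pvScan tokens items b = (items.flatMap (pvTrackItems tokens)).foldl pvStepSent b := by
  induction items generalizing b with
  | nil => rfl
  | cons it its ih =>
    obtain ⟨lang, entries⟩ := it
    simp only [pvScan, List.flatMap_cons, List.foldl_append, pvTrackItems]
    rw [ih, pvBestEnts_eq]
    rfl

lemma pvInnerA (ls : Int) (entries : List (List (String × String))) (acc : List (Int × String)) :
    entries.foldl (pvInnerStepA ls) acc = acc ++ entries.flatMap (pvEntItems ls) := by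
  induction entries generalizing acc with
  | nil => simp
  | cons e es ih =>
    simp only [List.foldl_cons, List.flatMap_cons]
    rw [ih]
    simp only [pvInnerStepA, pvEntItems]
    split_ifs with h <;> simp

lemma pvOuterA (toks : List String)
    (hs : ∀ s, pvLangScoreA (PySem.List.enumerate toks) s = pvLangScoreC toks s)
    (items : List (String × List (List (String × String)))) (acc : List (Int × String)) :
    items.foldl (pvOuterStepA toks) acc = acc ++ items.flatMap (pvTrackItems toks) := by
  induction items generalizing acc with
  | nil => simp
  | cons it its ih =>
    simp only [List.foldl_cons, List.flatMap_cons]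
    rw [ih]
    simp only [pvOuterStepA, pvTrackItems, hs]
    rw [pvInnerA, List.append_assoc]

lemma pvHead_insertBy (key : Int × String → Int) (x : Int × String) (acc : List (Int × String)) :
    (PySem.List.insertBy (fun a b => decide (key b < key a)) x acc).head? =
      match acc.head? with
      | none => some x
      | some m => if key m < key x then some x else some m := by
  cases acc with
  | nil => simp [PySem.List.insertBy]
  | cons y ys =>
    simp only [PySem.List.insertBy, List.head?_cons]
    by_cases h : key y < key x <;> simp [h]

lemma pvHead_foldl_insertBy (key : Int × String → Int) (l acc : List (Int × String)) :
    (l.foldl (fun acc x => PySem.List.insertBy (fun a b => decide (key b < key a)) x acc) acc).head? =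
      l.foldl (fun o p =>
        match o with
        | none => some p
        | some m => if key m < key p then some p else some m) acc.head? := by
  induction l generalizing acc with
  | nil => rfl
  | cons x xs ih =>
    simp only [List.foldl_cons]
    rw [ih, pvHead_insertBy]

lemma pvHead_sorted_rev (l : List (Int × String)) :
    (PySem.List.sorted l (fun x => x.1) true).head? = l.foldl pvMaxStep none := by
  rw [PySem.List.sorted_rev_eq_foldl_insertBy,
      pvHead_foldl_insertBy (fun x => x.1) l []]
  rfl

lemma pvFoldSome (l : List (Int × String)) (b : Int × String) :
    l.foldl pvMaxStep (some b) = some (l.foldl pvStepSent b) := by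
  induction l generalizing b with
  | nil => rfl
  | cons p ps ih =>
    simp only [List.foldl_cons]
    have : pvMaxStep (some b) p = some (pvStepSent b p) := by
      simp only [pvMaxStep, pvStepSent]
      split_ifs <;> rfl
    rw [this, ih]

lemma pvEntItems_nonneg (ls : Int) (hls : 0 ≤ ls) (e : List (String × String))
    (p : Int × String) (hp : p ∈ pvEntItems ls e) : 0 ≤ p.1 := by
  simp only [pvEntItems] at hp
  split_ifs at hp <;> simp_all <;> omega

lemma pvCandidates_nonneg (toks : List String) (hb : (toks.length : Int) ≤ 100)
    (items : List (String × List (List (String × String))))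
    (p : Int × String) (hp : p ∈ items.flatMap (pvTrackItems toks)) : 0 ≤ p.1 := by
  simp only [List.mem_flatMap, pvTrackItems] at hp
  obtain ⟨it, _, e, _, hpe⟩ := hp
  exact pvEntItems_nonneg _ (pvLangScoreC_nonneg toks _ hb) e p hpe

-- ===== VERDICT (by name: the statement is the Claim_ definition above) =====
theorem select_caption_track_url_spec : Claim_equal_select_caption_track_url := by
  intro tracks preferred_lang _
  unfold Spec_select_caption_track_url select_caption_track_url select_caption_track_url_alt
  set toks := (if preferred_lang ≠ "" then [PySem.Str.lower preferred_lang] else []) ++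
    ["zh-hant", "zh-hans", "zh", "yue", "ja", "ko", "en"] with htoks
  have hlen : (toks.length : Int) ≤ 100 := by
    by_cases h : preferred_lang = "" <;> simp [htoks, h]
  have hs : ∀ s, pvLangScoreA (PySem.List.enumerate toks) s = pvLangScoreC toks s := by
    intro s
    unfold pvLangScoreC
    exact pvLangScore_eq toks s 0 (le_refl 0) (by omega)
  dsimp only
  rw [pvOuterA toks hs _ [], pvScan_eq]
  set l := (PySem.Dict.ofList tracks).items.flatMap (pvTrackItems toks) with hl
  have hhead := pvHead_sorted_rev l
  cases hl' : l with
  | nil => rfl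
  | cons p ps =>
    have hp0 : (0 : Int) ≤ p.1 := by
      apply pvCandidates_nonneg toks hlen
      rw [← hl, hl']; exact List.mem_cons_self
    rw [hl'] at hhead
    have hne : ¬ (p :: ps).isEmpty = true := by simp
    simp only [List.nil_append, List.foldl_cons, hne]
    have hfirst : pvStepSent (-1, "") p = p := by
      simp only [pvStepSent]
      rw [if_pos (by omega)]
    rw [hfirst]
    rw [List.foldl_cons, show pvMaxStep none p = some p from rfl, pvFoldSome] at hhead
    cases hsorted : PySem.List.sorted (p :: ps) (fun x => x.1) true with
    | nil =>
      have hperm := PySem.List.sorted_perm (p :: ps) (fun x : Int × String => x.1) true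
      rw [hsorted] at hperm
      exact absurd hperm.length_eq (by simp)
    | cons m t =>
      rw [hsorted] at hhead
      simp only [List.head?_cons, Option.some.injEq] at hhead
      rw [← hhead]
      simp
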